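-- pv_equiv track=rewrite | github.com/enricotomasi/GeeksforGeeks_problems | Easy/Divisor Product.py | divisorProduct
-- ===== SOURCE A (Python) =====
-- import math
-- import math
--
-- def divisorProduct(N):
--     # code here
--     ans = 1
--     m = 1000000007
--
--     for i in range(1, int(math.sqrt(N) + 1)):
--         if N % i == 0:
--             ans = (ans * i) %m
--             if N // i != i:
--                 ans = (ans * (N//i))%m
--
--     return ans
-- ===== SOURCE B (Python) =====
-- import math
--
-- def divisorProduct(N):
--     # product of divisors of N mod 1e9+7, via divisor COUNT + one modular power:
--     # prod(divisors) = N^(d//2), times isqrt(N) when d is odd (N a perfect square).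
--     m = 1000000007
--     s = math.isqrt(N)
--     d = 0
--     for i in range(1, s + 1):
--         if N % i == 0:
--             d += 1 if N // i == i else 2
--     ans = pow(N % m, d // 2, m)
--     if d % 2:
--         ans = ans * s % m
--     return ans
-- ===== Notes on version B (the rewrite author's own statement) =====
-- stated objective: alternative
-- what changed: Instead of multiplying every divisor into a running modular product, B only counts the divisors d during the sqrt(N) scan and computes the product as one modular power pow(N % p, d // 2, p), times isqrt(N) when d is odd (N a perfect square), using the identity prod(divisors) = N^(d/2).
import Mathlib
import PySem

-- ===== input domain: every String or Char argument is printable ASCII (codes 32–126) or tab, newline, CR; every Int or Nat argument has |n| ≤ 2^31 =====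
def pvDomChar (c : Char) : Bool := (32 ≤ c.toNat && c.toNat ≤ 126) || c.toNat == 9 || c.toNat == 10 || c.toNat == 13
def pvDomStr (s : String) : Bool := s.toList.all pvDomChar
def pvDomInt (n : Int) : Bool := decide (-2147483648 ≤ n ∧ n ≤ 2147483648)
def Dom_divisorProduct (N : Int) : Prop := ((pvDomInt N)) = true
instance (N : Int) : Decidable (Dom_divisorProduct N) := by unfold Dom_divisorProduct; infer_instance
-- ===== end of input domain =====

-- B replaces A's "multiply every divisor into the answer" loop by "count the divisors,
-- then one modular power": prod(divisors N) = N^(d//2) (times isqrt N when d is odd).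
-- Equivalence of return values is proved on Pre_ (0 ≤ N); both Pythons raise ValueError on N < 0.

-- ===== PORT A =====
-- loop body of A: if N % i == 0: ans = (ans*i)%m; if N//i != i: ans = (ans*(N//i))%m
def dpStepA (N : Int) (ans i : Int) : Int :=
  if PySem.Int.mod N i == 0 then
    let a1 := PySem.Int.mod (ans * i) 1000000007
    if PySem.Int.floordiv N i != i then PySem.Int.mod (a1 * PySem.Int.floordiv N i) 1000000007
    else a1
  else ans

-- int(math.sqrt(N) + 1) = Nat.sqrt N + 1: exact for every 0 ≤ N ≤ 2^31 (double sqrt is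
-- correctly rounded and cannot cross an integer there); math.sqrt raises on N < 0 (Pre_).
def divisorProduct (N : Int) : Int :=
  (PySem.List.pyRange 1 ((N.toNat.sqrt : Int) + 1) 1).foldl (dpStepA N) 1

-- ===== PORT B =====
-- loop body of B: if N % i == 0: d += 1 if N // i == i else 2
def dpStepB (N : Int) (d i : Int) : Int :=
  if PySem.Int.mod N i == 0 then (if PySem.Int.floordiv N i == i then d + 1 else d + 2) else d

-- math.isqrt(N) = Nat.sqrt (raises on N < 0, excluded by Pre_); pow(x, k, m) = PySem.Int.powMod
def divisorProduct_alt (N : Int) : Int :=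
  let s : Int := (N.toNat.sqrt : Int)
  let d : Int := (PySem.List.pyRange 1 (s + 1) 1).foldl (dpStepB N) 0
  let ans := PySem.Int.powMod (PySem.Int.mod N 1000000007) (PySem.Int.floordiv d 2).toNat 1000000007
  if PySem.Int.mod d 2 != 0 then PySem.Int.mod (ans * s) 1000000007 else ans

-- ===== PRECONDITION & SPEC =====
-- Pre_ excludes N < 0, where Python A raises ValueError (math.sqrt of a negative number).
def Pre_divisorProduct (N : Int) : Prop := 0 ≤ N
instance (N : Int) : Decidable (Pre_divisorProduct N) := by unfold Pre_divisorProduct; infer_instance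
def pvWitness_divisorProduct : Int := (36)

def Spec_divisorProduct (N : Int) (out : Int) : Prop := out = divisorProduct_alt N
instance (N : Int) (out : Int) : Decidable (Spec_divisorProduct N out) := by unfold Spec_divisorProduct; infer_instance

-- ===== CLAIM (what is proved, stated in full; the proofs are below) =====
def Claim_equal_divisorProduct : Prop := ∀ (N : Int), Dom_divisorProduct N → Pre_divisorProduct N → Spec_divisorProduct N (divisorProduct N)

-- ===== LEMMAS AND PROOFS =====

lemma dp_emod_mul_left (x y m : Int) : (x % m * y) % m = x * y % m := by
  rw [Int.mul_emod, Int.emod_emod_of_dvd _ dvd_rfl, ← Int.mul_emod]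

lemma dp_emod_mul_right (x y m : Int) : (x * (y % m)) % m = x * y % m := by
  rw [Int.mul_emod, Int.emod_emod_of_dvd _ dvd_rfl, ← Int.mul_emod]

-- joint loop invariant: over a stretch of indices that only produce PAIRS {i, N/i},
-- B's count stays even and A's accumulator is (N % m)^(count/2) % m.
lemma dpInv (N : Int) (L : List Int)
    (hL : ∀ i ∈ L, 0 < i ∧ (N % i = 0 → N / i ≠ i)) (a d : Int)
    (hd : 0 ≤ d) (he : d % 2 = 0)
    (ha : a = (N % 1000000007) ^ (d / 2).toNat % 1000000007) :
    0 ≤ L.foldl (dpStepB N) d ∧ (L.foldl (dpStepB N)) d % 2 = 0 ∧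
      L.foldl (dpStepA N) a =
        (N % 1000000007) ^ ((L.foldl (dpStepB N) d) / 2).toNat % 1000000007 := by
  induction L generalizing a d with
  | nil => exact ⟨hd, he, ha⟩
  | cons i L ih =>
    obtain ⟨hi, hpair⟩ := hL i (List.mem_cons_self ..)
    have hL' : ∀ j ∈ L, 0 < j ∧ (N % j = 0 → N / j ≠ j) :=
      fun j hj => hL j (List.mem_cons_of_mem _ hj)
    simp only [List.foldl_cons]
    by_cases hdvd : N % i = 0
    · have hne : N / i ≠ i := hpair hdvd
      have hA : dpStepA N a i = ((a * i) % 1000000007 * (N / i)) % 1000000007 := by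
        simp [dpStepA, PySem.Int.mod_eq_emod_of_pos hi, PySem.Int.floordiv_eq_ediv_of_pos hi,
          hdvd, hne]
      have hB : dpStepB N d i = d + 2 := by
        simp [dpStepB, PySem.Int.mod_eq_emod_of_pos hi, PySem.Int.floordiv_eq_ediv_of_pos hi,
          hdvd, hne]
      rw [hA, hB]
      refine ih hL' _ _ (by omega) (by omega) ?_
      have hNi : N / i * i = N := Int.ediv_mul_cancel (Int.dvd_of_emod_eq_zero hdvd)
      have hexp : ((d + 2) / 2).toNat = (d / 2).toNat + 1 := by omega
      calc ((a * i) % 1000000007 * (N / i)) % 1000000007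
          = (a * i * (N / i)) % 1000000007 := dp_emod_mul_left ..
        _ = (a * N) % 1000000007 := by rw [mul_assoc, mul_comm i (N / i), hNi]
        _ = ((N % 1000000007) ^ (d / 2).toNat % 1000000007 * N) % 1000000007 := by rw [ha]
        _ = ((N % 1000000007) ^ (d / 2).toNat * N) % 1000000007 := dp_emod_mul_left ..
        _ = ((N % 1000000007) ^ (d / 2).toNat * (N % 1000000007)) % 1000000007 := by
              rw [dp_emod_mul_right]
        _ = (N % 1000000007) ^ ((d + 2) / 2).toNat % 1000000007 := by rw [hexp, pow_succ]
    · have hA : dpStepA N a i = a := by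
        simp [dpStepA, PySem.Int.mod_eq_emod_of_pos hi, hdvd]
      have hB : dpStepB N d i = d := by
        simp [dpStepB, PySem.Int.mod_eq_emod_of_pos hi, hdvd]
      rw [hA, hB]
      exact ih hL' a d hd he ha

lemma dp_sq_le (N : Int) (hN : 0 ≤ N) : (N.toNat.sqrt : Int) * (N.toNat.sqrt : Int) ≤ N := by
  have h := Nat.sqrt_le' N.toNat
  have h2 : ((N.toNat.sqrt ^ 2 : Nat) : Int) ≤ (N.toNat : Int) := by exact_mod_cast h
  rw [Int.toNat_of_nonneg hN] at h2
  push_cast at h2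
  nlinarith [h2]

-- every index strictly below isqrt N pairs i with a DIFFERENT cofactor N / i
lemma dp_no_self_pair (N i : Int) (hN : 0 ≤ N) (h1 : 1 ≤ i) (hlt : i < (N.toNat.sqrt : Int))
    (hdvd : N % i = 0) : N / i ≠ i := by
  intro heq
  have hNi : N / i * i = N := Int.ediv_mul_cancel (Int.dvd_of_emod_eq_zero hdvd)
  have hs := dp_sq_le N hN
  nlinarith [hs, hNi, heq]

theorem divisorProduct_spec : Claim_equal_divisorProduct := by
  intro N _ hN
  unfold Spec_divisorProduct divisorProduct divisorProduct_alt
  dsimp only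
  set s : Int := (N.toNat.sqrt : Int) with hs
  have hs0 : 0 ≤ s := by positivity
  have hinit : (1 : Int) = (N % 1000000007) ^ ((0 : Int) / 2).toNat % 1000000007 := by norm_num
  by_cases hsq : 1 ≤ s ∧ N % s = 0 ∧ N / s = s
  · -- N is a positive perfect square: split off the last index i = s
    obtain ⟨hs1, hmod, hdiv⟩ := hsq
    have hsplit : PySem.List.pyRange 1 (s + 1) 1 = PySem.List.pyRange 1 s 1 ++ [s] :=
      PySem.List.pyRange_one_succ_right hs1
    have hmem : ∀ i ∈ PySem.List.pyRange 1 s 1, 0 < i ∧ (N % i = 0 → N / i ≠ i) := by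
      intro i hi
      rw [PySem.List.mem_pyRange_one] at hi
      exact ⟨by omega, fun hd => dp_no_self_pair N i hN (by omega) hi.2 hd⟩
    obtain ⟨hd0, hd2, hA⟩ := dpInv N (PySem.List.pyRange 1 s 1) hmem 1 0 le_rfl rfl hinit
    rw [hsplit, List.foldl_append, List.foldl_append]
    set d := (PySem.List.pyRange 1 s 1).foldl (dpStepB N) 0 with hdd
    set a := (PySem.List.pyRange 1 s 1).foldl (dpStepA N) 1 with haa
    have hs' : (0:Int) < s := hs1
    have hd2' : d % 2 = 0 := hd2
    have hstepA : List.foldl (dpStepA N) a [s] = (a * s) % 1000000007 := by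
      simp [dpStepA, PySem.Int.mod_eq_emod_of_pos hs', PySem.Int.floordiv_eq_ediv_of_pos hs',
        hmod, hdiv]
    have hstepB : List.foldl (dpStepB N) d [s] = d + 1 := by
      simp [dpStepB, PySem.Int.mod_eq_emod_of_pos hs', PySem.Int.floordiv_eq_ediv_of_pos hs',
        hmod, hdiv]
    rw [hstepA, hstepB]
    have hodd : PySem.Int.mod (d + 1) 2 = 1 := by
      rw [PySem.Int.mod_eq_emod_of_pos (by norm_num)]; omega
    have hfd : PySem.Int.floordiv (d + 1) 2 = d / 2 := by
      rw [PySem.Int.floordiv_eq_ediv_of_pos (by norm_num)]; omega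
    rw [hodd, hfd]
    simp only [bne_iff_ne, ne_eq, one_ne_zero, not_false_eq_true, if_true]
    rw [PySem.Int.powMod_eq_emod _ _ (by norm_num),
      PySem.Int.mod_eq_emod_of_pos (a := N) (by norm_num),
      PySem.Int.mod_eq_emod_of_pos (by norm_num), ← hA]
  · -- no middle self-paired divisor: the whole loop is pair steps, B's count is even
    have hmem : ∀ i ∈ PySem.List.pyRange 1 (s + 1) 1, 0 < i ∧ (N % i = 0 → N / i ≠ i) := by
      intro i hi
      rw [PySem.List.mem_pyRange_one] at hi
      refine ⟨by omega, fun hd => ?_⟩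
      rcases lt_or_eq_of_le (show i ≤ s by omega) with hlt | heq
      · exact dp_no_self_pair N i hN (by omega) hlt hd
      · subst heq; exact fun hdiv => hsq ⟨by omega, hd, hdiv⟩
    obtain ⟨hd0, hd2, hA⟩ := dpInv N (PySem.List.pyRange 1 (s + 1) 1) hmem 1 0 le_rfl rfl hinit
    set d := (PySem.List.pyRange 1 (s + 1) 1).foldl (dpStepB N) 0
    have heven : PySem.Int.mod d 2 = 0 := by
      rw [PySem.Int.mod_eq_emod_of_pos (by norm_num)]; omega
    have hfd : PySem.Int.floordiv d 2 = d / 2 := by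
      rw [PySem.Int.floordiv_eq_ediv_of_pos (by norm_num)]
    rw [heven, hfd]
    simp only [bne_self_eq_false]
    rw [PySem.Int.powMod_eq_emod _ _ (by norm_num),
      PySem.Int.mod_eq_emod_of_pos (a := N) (by norm_num)]
    exact hA
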